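-- pv_equiv track=rewrite | github.com/patrickverardi45/walkv1 | backend/main.py | _route_sheet_sequence
-- ===== SOURCE A (Python) =====
-- from typing import Any, Dict, List, Optional, Sequence, Tuple
--
-- CURRENT_PACKET_PRINT_SHEET_INDEX: Dict[str, Dict[str, Any]] = {
--     # Calibrated from the detailed engineering sheets in the 07-15-25 Brenham Phase 5 design set.
--     # The new Fieldwire report becomes useful starting at its page 24 because that is where the
--     # embedded engineering plan pages begin showing street-level route geometry, matchlines, and
--     # sheet continuity. We use those plan sheets as the print-to-street truth layer.
--     #
--     # Route-id calibration against the current KMZ underground-cable lines: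
--     # route_476 -> E Stone St corridor
--     # route_477 -> E Tom Green St corridor
--     # route_478 -> E Mansfield St corridor
--     # route_479 / route_480 -> Niebuhr St corridor
--     # route_475 -> Glenda Blvd corridor
--     "1": {"sheet": 1, "streets": ["E STONE ST"], "route_ids": ["route_476"]},
--     "2": {"sheet": 2, "streets": ["E STONE ST"], "route_ids": ["route_476"]},
--     "3": {"sheet": 3, "streets": ["E STONE ST"], "route_ids": ["route_476"]},
--     "4": {"sheet": 4, "streets": ["E STONE ST", "NIEBUHR ST"], "route_ids": ["route_476", "route_479"]},
--     "5": {"sheet": 5, "streets": ["NIEBUHR ST"], "route_ids": ["route_479", "route_480"]},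
--     "6": {"sheet": 6, "streets": ["NIEBUHR ST"], "route_ids": ["route_479", "route_480"]},
--     # For the paired 7,15 bore-log context the design truth is the E Stone St corridor.
--     "7": {"sheet": 7, "streets": ["E STONE ST"], "route_ids": ["route_476"]},
--     "8": {"sheet": 8, "streets": ["E MANSFIELD ST"], "route_ids": ["route_478"]},
--     "9": {"sheet": 9, "streets": ["E TOM GREEN ST"], "route_ids": ["route_477"]},
--     "10": {"sheet": 10, "streets": ["E TOM GREEN ST"], "route_ids": ["route_477"]},
--     "11": {"sheet": 11, "streets": ["E TOM GREEN ST"], "route_ids": ["route_477"]},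
--     "12": {"sheet": 12, "streets": ["E TOM GREEN ST"], "route_ids": ["route_477"]},
--     "13": {"sheet": 13, "streets": ["E TOM GREEN ST", "BRUCE ST"], "route_ids": ["route_477"]},
--     "14": {"sheet": 14, "streets": ["E MANSFIELD ST"], "route_ids": ["route_478"]},
--     "15": {"sheet": 15, "streets": ["E STONE ST"], "route_ids": ["route_476"]},
--     "16": {"sheet": 16, "streets": ["NIEBUHR ST"], "route_ids": ["route_479", "route_480"]},
--     "17": {"sheet": 17, "streets": ["NIEBUHR ST"], "route_ids": ["route_479", "route_480"]},
--     "18": {"sheet": 18, "streets": ["NIEBUHR ST", "E TOM GREEN ST"], "route_ids": ["route_477", "route_479", "route_480"]},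
--     "19": {"sheet": 19, "streets": ["NIEBUHR ST"], "route_ids": ["route_479", "route_480"]},
--     "20": {"sheet": 20, "streets": ["NIEBUHR ST"], "route_ids": ["route_479", "route_480"]},
--     "21": {"sheet": 21, "streets": ["NIEBUHR ST"], "route_ids": ["route_479", "route_480"]},
--     "22": {"sheet": 22, "streets": ["NIEBUHR ST", "E TOM GREEN ST"], "route_ids": ["route_477", "route_479", "route_480"]},
--     "23": {"sheet": 23, "streets": ["CARLEE DR"], "route_ids": ["route_478"]},
--     "24": {"sheet": 24, "streets": ["POST OAK CT"], "route_ids": ["route_478"]},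
--     "25": {"sheet": 25, "streets": ["GLENDA BLVD"], "route_ids": ["route_475"]},
--     "26": {"sheet": 26, "streets": ["GLENDA BLVD"], "route_ids": ["route_475"]},
--     "27": {"sheet": 27, "streets": ["GLENDA BLVD"], "route_ids": ["route_475"]},
--     "28": {"sheet": 28, "streets": ["GLENDA BLVD"], "route_ids": ["route_475"]},
--     "29": {"sheet": 29, "streets": ["GLENDA BLVD"], "route_ids": ["route_475"]},
--     "30": {"sheet": 30, "streets": ["E STONE ST"], "route_ids": ["route_476"]},
-- }
--
-- def _route_sheet_sequence(route_id: Any) -> List[int]: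
--     target = str(route_id or "").strip()
--     if not target:
--         return []
--     sheets: List[int] = []
--     for token, entry in CURRENT_PACKET_PRINT_SHEET_INDEX.items():
--         route_ids = [str(value or "").strip() for value in (entry.get("route_ids") or [])]
--         if target not in route_ids:
--             continue
--         sheet = entry.get("sheet")
--         if isinstance(sheet, int) and sheet not in sheets:
--             sheets.append(sheet)
--     sheets.sort()
--     return sheets
-- ===== SOURCE B (Python) =====
-- from typing import Any, Dict, List
--
-- # B: the source table CURRENT_PACKET_PRINT_SHEET_INDEX is a static module constant,
-- # so the route_id -> sorted sheet list mapping is precomputed once and stored as a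
-- # literal inverted index; each call is a single dict lookup returning a fresh list.
-- _ROUTE_SHEET_INDEX: Dict[str, List[int]] = {
--     "route_475": [25, 26, 27, 28, 29],
--     "route_476": [1, 2, 3, 4, 7, 15, 30],
--     "route_477": [9, 10, 11, 12, 13, 18, 22],
--     "route_478": [8, 14, 23, 24],
--     "route_479": [4, 5, 6, 16, 17, 18, 19, 20, 21, 22],
--     "route_480": [5, 6, 16, 17, 18, 19, 20, 21, 22],
-- }
--
-- def _route_sheet_sequence(route_id: Any) -> List[int]:
--     target = str(route_id or "").strip()
--     if not target:
--         return []
--     return list(_ROUTE_SHEET_INDEX.get(target, []))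
-- ===== Notes on version B (the rewrite author's own statement) =====
-- stated objective: faster
-- what changed: B replaces A's per-call scan of the 30-entry table (with per-bucket membership tests and a sort) by a precomputed literal inverted index mapping each route_id to its sorted deduplicated sheet list, so a call is just a strip plus one dict lookup.
import Mathlib
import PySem

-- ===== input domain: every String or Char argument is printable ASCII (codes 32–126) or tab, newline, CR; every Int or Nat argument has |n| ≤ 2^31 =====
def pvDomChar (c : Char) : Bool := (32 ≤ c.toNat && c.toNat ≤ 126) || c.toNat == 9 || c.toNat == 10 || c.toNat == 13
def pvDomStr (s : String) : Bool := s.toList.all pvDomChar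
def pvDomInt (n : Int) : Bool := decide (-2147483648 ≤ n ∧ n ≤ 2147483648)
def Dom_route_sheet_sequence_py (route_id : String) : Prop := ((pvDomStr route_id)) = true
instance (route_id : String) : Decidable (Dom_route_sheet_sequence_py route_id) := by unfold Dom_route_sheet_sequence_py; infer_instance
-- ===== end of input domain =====

-- B replaces A's per-call scan of the static sheet table by a precomputed literal inverted
-- index (route_id -> sorted sheet list) and a single dict lookup (objective: faster per call).

-- ===== PORT A =====
-- CURRENT_PACKET_PRINT_SHEET_INDEX as (token, sheet, route_ids); the unused "streets" field is omitted.
def pvSheetTable : List (String × Int × List String) := [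
    ("1", 1, ["route_476"]),
    ("2", 2, ["route_476"]),
    ("3", 3, ["route_476"]),
    ("4", 4, ["route_476", "route_479"]),
    ("5", 5, ["route_479", "route_480"]),
    ("6", 6, ["route_479", "route_480"]),
    ("7", 7, ["route_476"]),
    ("8", 8, ["route_478"]),
    ("9", 9, ["route_477"]),
    ("10", 10, ["route_477"]),
    ("11", 11, ["route_477"]),
    ("12", 12, ["route_477"]),
    ("13", 13, ["route_477"]),
    ("14", 14, ["route_478"]),
    ("15", 15, ["route_476"]),
    ("16", 16, ["route_479", "route_480"]),
    ("17", 17, ["route_479", "route_480"]),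
    ("18", 18, ["route_477", "route_479", "route_480"]),
    ("19", 19, ["route_479", "route_480"]),
    ("20", 20, ["route_479", "route_480"]),
    ("21", 21, ["route_479", "route_480"]),
    ("22", 22, ["route_477", "route_479", "route_480"]),
    ("23", 23, ["route_478"]),
    ("24", 24, ["route_478"]),
    ("25", 25, ["route_475"]),
    ("26", 26, ["route_475"]),
    ("27", 27, ["route_475"]),
    ("28", 28, ["route_475"]),
    ("29", 29, ["route_475"]),
    ("30", 30, ["route_476"])
]

-- A's loop over the table (target is already stripped); isinstance(sheet, int) is always true here
-- since every "sheet" field is an int, so that test is omitted.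
def pvScanA (target : String) : List Int :=
  PySem.List.sorted
    (pvSheetTable.foldl (fun sheets e =>
      let route_ids := e.2.2.map (fun v => PySem.Str.strip v)
      if target ∈ route_ids then
        if e.2.1 ∈ sheets then sheets else sheets ++ [e.2.1]
      else sheets) ([] : List Int))
    (fun x => x) false

def route_sheet_sequence_py (route_id : String) : List Int :=
  let target := PySem.Str.strip route_id
  if target = "" then []
  else pvScanA target

-- ===== PORT B =====
-- _ROUTE_SHEET_INDEX: the precomputed literal inverted index from Source B.
def pvRouteSheetIndex : PySem.Dict String (List Int) := PySem.Dict.mk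
  [("route_475", [25, 26, 27, 28, 29]),
   ("route_476", [1, 2, 3, 4, 7, 15, 30]),
   ("route_477", [9, 10, 11, 12, 13, 18, 22]),
   ("route_478", [8, 14, 23, 24]),
   ("route_479", [4, 5, 6, 16, 17, 18, 19, 20, 21, 22]),
   ("route_480", [5, 6, 16, 17, 18, 19, 20, 21, 22])]

def route_sheet_sequence_py_alt (route_id : String) : List Int :=
  let target := PySem.Str.strip route_id
  if target = "" then []
  else pvRouteSheetIndex.getD target []

-- ===== PRECONDITION & SPEC =====
def Spec_route_sheet_sequence_py (route_id : String) (out : List Int) : Prop := out = route_sheet_sequence_py_alt route_id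
instance (route_id : String) (out : List Int) : Decidable (Spec_route_sheet_sequence_py route_id out) := by unfold Spec_route_sheet_sequence_py; infer_instance

-- ===== CLAIM =====
def Claim_equal_route_sheet_sequence_py : Prop := ∀ (route_id : String), Dom_route_sheet_sequence_py route_id → Spec_route_sheet_sequence_py route_id (route_sheet_sequence_py route_id)

-- ===== LEMMAS AND PROOFS =====

-- For every stripped target, A's scan of the table equals B's index lookup.
set_option maxRecDepth 8192 in
lemma pvScanA_eq_lookup (t : String) : pvScanA t = pvRouteSheetIndex.getD t [] := by
  by_cases h475 : t = "route_475"; · subst h475; decide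
  by_cases h476 : t = "route_476"; · subst h476; decide
  by_cases h477 : t = "route_477"; · subst h477; decide
  by_cases h478 : t = "route_478"; · subst h478; decide
  by_cases h479 : t = "route_479"; · subst h479; decide
  by_cases h480 : t = "route_480"; · subst h480; decide
  have s475 : PySem.Str.strip "route_475" = "route_475" := by decide
  have s476 : PySem.Str.strip "route_476" = "route_476" := by decide
  have s477 : PySem.Str.strip "route_477" = "route_477" := by decide
  have s478 : PySem.Str.strip "route_478" = "route_478" := by decide
  have s479 : PySem.Str.strip "route_479" = "route_479" := by decide
  have s480 : PySem.Str.strip "route_480" = "route_480" := by decide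
  have hA : pvScanA t = [] := by
    simp [pvScanA, pvSheetTable, s475, s476, s477, s478, s479, s480,
      Ne.symm h475, Ne.symm h476, Ne.symm h477, Ne.symm h478, Ne.symm h479, Ne.symm h480, PySem.List.sorted]
  have hB : pvRouteSheetIndex.getD t [] = [] := by
    simp [pvRouteSheetIndex, PySem.Dict.getD_eq_get?_getD,
      Ne.symm h475, Ne.symm h476, Ne.symm h477, Ne.symm h478, Ne.symm h479, Ne.symm h480,
      PySem.Dict.get?]
  rw [hA, hB]

-- ===== VERDICT =====
theorem route_sheet_sequence_py_spec : Claim_equal_route_sheet_sequence_py := by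
  intro route_id _
  unfold Spec_route_sheet_sequence_py route_sheet_sequence_py route_sheet_sequence_py_alt
  by_cases h : PySem.Str.strip route_id = ""
  · simp [h]
  · simp [h, pvScanA_eq_lookup]
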